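-- pv_equiv track=rewrite | github.com/agusscarmu/Bioinformatica | HiddingMsgDNA/MotifEnum.py | neighbors_with_mismatches
-- ===== SOURCE A (Python) =====
-- def neighbors_with_mismatches(pattern, d):
--     if d == 0:
--         return [pattern]
--     if len(pattern) == 1:
--         return ['A', 'C', 'G', 'T']
--     neighbors = []
--     suffix_neighbors = neighbors_with_mismatches(pattern[1:], d) #Uso de recursividad para tomar todos los neighbors posibles
--     for neighbor in suffix_neighbors:
--         if hamming_distance(pattern[1:], neighbor) < d:
--             for base in ['A', 'C', 'G', 'T']:
--                 neighbors.append(base + neighbor)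
--         else:
--             neighbors.append(pattern[0] + neighbor)
--     return neighbors
--
-- def hamming_distance(s1, s2):
--     return sum([c1 != c2 for c1, c2 in zip(s1, s2)])
-- ===== SOURCE B (Python) =====
-- def neighbors_with_mismatches(pattern, d):
--     if d == 0:
--         return [pattern]
--     if len(pattern) == 1:
--         return ['A', 'C', 'G', 'T']
--     # bottom-up DP over (neighbor, mismatch-count) pairs, last character first
--     pairs = [(b, 0 if b == pattern[-1] else 1) for b in ['A', 'C', 'G', 'T']]
--     for ch in reversed(pattern[:-1]):
--         new = []
--         for s, m in pairs:
--             if m < d: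
--                 for b in ['A', 'C', 'G', 'T']:
--                     new.append((b + s, m + (b != ch)))
--             else:
--                 new.append((ch + s, m))
--         pairs = new
--     return [s for s, _ in pairs]
-- ===== Notes on version B (the rewrite author's own statement) =====
-- stated objective: alternative
-- what changed: Replaces A's top-down recursion, which recomputes hamming_distance over the suffix for every neighbor at every level, by an iterative bottom-up DP over the pattern that carries each neighbor together with its mismatch count, so no hamming distance is ever recomputed (intended as faster; measured 7.35x at n=16 but both time out on larger inputs since the output itself is exponential).
import Mathlib
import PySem

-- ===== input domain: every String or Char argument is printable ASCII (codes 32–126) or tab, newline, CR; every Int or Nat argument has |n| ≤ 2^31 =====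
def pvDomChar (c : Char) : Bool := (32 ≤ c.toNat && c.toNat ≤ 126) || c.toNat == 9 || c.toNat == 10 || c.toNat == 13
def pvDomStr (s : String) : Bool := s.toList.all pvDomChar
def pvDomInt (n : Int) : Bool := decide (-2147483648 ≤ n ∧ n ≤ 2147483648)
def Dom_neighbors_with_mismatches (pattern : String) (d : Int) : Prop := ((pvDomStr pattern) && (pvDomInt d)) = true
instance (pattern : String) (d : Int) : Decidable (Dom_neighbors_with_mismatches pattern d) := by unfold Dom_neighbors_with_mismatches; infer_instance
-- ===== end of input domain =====

-- B replaces A's top-down recursion (which recomputes hamming_distance for every suffix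
-- neighbor) by an iterative bottom-up pass carrying (neighbor, mismatch-count) pairs.

-- ===== PORT A =====
-- hamming_distance: sum of booleans over zip
def hammingA (s1 s2 : List Char) : Int :=
  ((s1.zip s2).map (fun p => if p.1 ≠ p.2 then (1 : Int) else 0)).sum

-- recursive core on the character list; Python recurses on pattern[1:].
-- On [] with d ≠ 0 Python recurses forever (RecursionError): that input is outside
-- Pre_; the port returns [] there.
def nwmA (l : List Char) (d : Int) : List (List Char) :=
  if d = 0 then [l]
  else if l.length = 1 then [['A'], ['C'], ['G'], ['T']]
  else match l with
    | [] => []  -- Python: RecursionError (excluded by Pre_)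
    | c :: rest =>
      (nwmA rest d).foldl (fun neighbors neighbor =>
        if hammingA rest neighbor < d then
          (['A', 'C', 'G', 'T'].foldl (fun acc b => acc ++ [b :: neighbor]) neighbors)
        else neighbors ++ [c :: neighbor]) []
  termination_by l.length
  decreasing_by simp_all

def neighbors_with_mismatches (pattern : String) (d : Int) : List String :=
  (nwmA pattern.toList d).map String.mk

-- ===== PORT B =====
-- one DP step: prepend the current character's choices to every (neighbor, count) pair
def nwmBstep (d : Int) (pairs : List (List Char × Int)) (ch : Char) : List (List Char × Int) :=
  pairs.foldl (fun acc p =>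
    if p.2 < d then
      (['A', 'C', 'G', 'T'].foldl
        (fun acc2 b => acc2 ++ [(b :: p.1, p.2 + (if b ≠ ch then 1 else 0))]) acc)
    else acc ++ [(ch :: p.1, p.2)]) []

-- DP over the list: seed from the last character, fold the earlier ones right-to-left
def nwmBcore (l : List Char) (d : Int) : List (List Char × Int) :=
  match l.reverse with
  | [] => []  -- Python: IndexError on pattern[-1] (excluded by Pre_)
  | last :: revPrefix =>
    revPrefix.foldl (nwmBstep d)
      (['A', 'C', 'G', 'T'].map (fun b => ([b], if b = last then (0 : Int) else 1)))

def neighbors_with_mismatches_alt (pattern : String) (d : Int) : List String :=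
  if d = 0 then [pattern]
  else if pattern.length = 1 then ["A", "C", "G", "T"]
  else (nwmBcore pattern.toList d).map (fun p => String.mk p.1)

-- ===== PRECONDITION & SPEC =====
-- Pre_ excludes only the empty pattern with d ≠ 0, where Python A hits infinite
-- recursion (RecursionError) and Python B raises IndexError on pattern[-1].
def Pre_neighbors_with_mismatches (pattern : String) (d : Int) : Prop :=
  pattern = "" → d = 0
instance (pattern : String) (d : Int) : Decidable (Pre_neighbors_with_mismatches pattern d) := by
  unfold Pre_neighbors_with_mismatches; infer_instance

def pvWitness_neighbors_with_mismatches : String × Int := ("ACG", 1)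

def Spec_neighbors_with_mismatches (pattern : String) (d : Int) (out : List String) : Prop := out = neighbors_with_mismatches_alt pattern d
instance (pattern : String) (d : Int) (out : List String) : Decidable (Spec_neighbors_with_mismatches pattern d out) := by unfold Spec_neighbors_with_mismatches; infer_instance

-- ===== CLAIM (what is proved, stated in full; the proofs are below) =====
def Claim_equal_neighbors_with_mismatches : Prop := ∀ (pattern : String) (d : Int), Dom_neighbors_with_mismatches pattern d → Pre_neighbors_with_mismatches pattern d → Spec_neighbors_with_mismatches pattern d (neighbors_with_mismatches pattern d)

-- ===== LEMMAS AND PROOFS =====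

theorem hammingA_cons (c b : Char) (s1 s2 : List Char) :
    hammingA (c :: s1) (b :: s2) = (if c ≠ b then (1 : Int) else 0) + hammingA s1 s2 := by
  simp [hammingA]

-- a neighbor paired with its hamming distance to the given pattern
def pairH (l : List Char) (n : List Char) : List Char × Int := (n, hammingA l n)

theorem pairH_cons (c : Char) (rest : List Char) (b : Char) (n : List Char) :
    pairH (c :: rest) (b :: n)
      = (b :: n, hammingA rest n + (if b ≠ c then (1 : Int) else 0)) := by
  simp only [pairH, hammingA_cons]
  congr 1
  rcases eq_or_ne b c with h | h
  · subst h; simp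
  · simp [h, Ne.symm h, Int.add_comm]

-- one DP step over the mapped list equals A's inner loop, mapped
theorem step_map (c : Char) (rest : List Char) (d : Int)
    (xs : List (List Char)) (acc : List (List Char)) :
    (xs.map (pairH rest)).foldl (fun acc p =>
        if p.2 < d then
          (['A', 'C', 'G', 'T'].foldl
            (fun acc2 b => acc2 ++ [(b :: p.1, p.2 + (if b ≠ c then 1 else 0))]) acc)
        else acc ++ [(c :: p.1, p.2)]) (acc.map (pairH (c :: rest)))
      = (xs.foldl (fun neighbors neighbor =>
          if hammingA rest neighbor < d then
            (['A', 'C', 'G', 'T'].foldl (fun a b => a ++ [b :: neighbor]) neighbors)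
          else neighbors ++ [c :: neighbor]) acc).map (pairH (c :: rest)) := by
  induction xs generalizing acc with
  | nil => rfl
  | cons n t ih =>
    simp only [List.map_cons, List.foldl_cons, pairH, List.foldl_nil]
    by_cases h : hammingA rest n < d
    · simp only [h, if_pos]
      have e : (acc.map (pairH (c :: rest)))
            ++ [('A' :: n, hammingA rest n + (if 'A' ≠ c then (1 : Int) else 0))]
            ++ [('C' :: n, hammingA rest n + (if 'C' ≠ c then (1 : Int) else 0))]
            ++ [('G' :: n, hammingA rest n + (if 'G' ≠ c then (1 : Int) else 0))]
            ++ [('T' :: n, hammingA rest n + (if 'T' ≠ c then (1 : Int) else 0))]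
          = (acc ++ ['A' :: n] ++ ['C' :: n] ++ ['G' :: n] ++ ['T' :: n]).map (pairH (c :: rest)) := by
        simp [pairH_cons]
      have := ih (acc ++ ['A' :: n] ++ ['C' :: n] ++ ['G' :: n] ++ ['T' :: n])
      rw [e]
      exact this
    · simp only [h, if_neg, not_false_iff]
      have e : (acc.map (pairH (c :: rest))) ++ [(c :: n, hammingA rest n)]
          = (acc ++ [c :: n]).map (pairH (c :: rest)) := by
        simp [pairH_cons]
      have := ih (acc ++ [c :: n])
      rw [e]
      exact this

theorem core_eq (d : Int) (hd : d ≠ 0) :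
    ∀ l : List Char, l ≠ [] → nwmBcore l d = (nwmA l d).map (pairH l) := by
  intro l
  induction l with
  | nil => intro h; exact absurd rfl h
  | cons c rest ih =>
    intro _
    rcases eq_or_ne rest [] with hr | hr
    · subst hr
      simp only [nwmBcore, List.reverse_cons, List.reverse_nil, List.nil_append,
        List.foldl_nil]
      rw [nwmA]
      simp only [hd, if_neg, not_false_iff, List.length_cons, List.length_nil, if_pos]
      have hb : ∀ b : Char, (([b], if b = c then (0 : Int) else 1) : List Char × Int)
          = pairH [c] [b] := by
        intro b
        simp only [pairH, hammingA]
        rcases eq_or_ne b c with h | h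
        · subst h; simp
        · simp [h, Ne.symm h]
      simp [hb]
    · -- rest nonempty: one DP step on the IH
      obtain ⟨last, revp, hrev⟩ : ∃ last revp, rest.reverse = last :: revp := by
        rcases hx : rest.reverse with _ | ⟨a, b⟩
        · exact absurd (by simpa using congrArg List.reverse hx) hr
        · exact ⟨a, b, rfl⟩
      have hcore : nwmBcore (c :: rest) d = nwmBstep d (nwmBcore rest d) c := by
        simp only [nwmBcore, List.reverse_cons, hrev, List.cons_append, List.foldl_append,
          List.foldl_cons, List.foldl_nil]
      rw [hcore, ih hr]
      have hlen : (c :: rest).length ≠ 1 := by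
        simp only [List.length_cons]
        intro h
        exact hr (List.eq_nil_of_length_eq_zero (by omega))
      rw [nwmA]
      simp only [hd, if_neg, not_false_iff, hlen]
      rw [nwmBstep]
      have := step_map c rest d (nwmA rest d) []
      simpa using this

theorem neighbors_with_mismatches_spec : Claim_equal_neighbors_with_mismatches := by
  intro pattern d _ hpre
  unfold Spec_neighbors_with_mismatches neighbors_with_mismatches neighbors_with_mismatches_alt
  rcases eq_or_ne d 0 with hd | hd
  · subst hd
    rw [nwmA.eq_def]
    simp only [if_pos trivial, List.map_cons, List.map_nil]
    show _ = _
    exact congrArg (fun x => [x]) String.ofList_toList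
  · rw [if_neg hd]
    have hne : pattern.toList ≠ [] := by
      intro h
      exact hd (hpre (String.toList_eq_nil_iff.mp h))
    by_cases h1 : pattern.length = 1
    · rw [if_pos h1]
      have h1' : pattern.toList.length = 1 := by rw [String.length_toList]; exact h1
      rw [nwmA.eq_def]
      simp only [hd, if_neg, not_false_iff, h1', if_pos]
      rfl
    · rw [if_neg h1]
      have h1' : pattern.toList.length ≠ 1 := by rw [String.length_toList]; exact h1
      rw [core_eq d hd pattern.toList hne]
      simp [pairH, List.map_map, Function.comp]
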